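-- pv_equiv track=rewrite | github.com/delmic/odemis | src/odemis/util/test/util_test.py | relative_boxes
-- ===== SOURCE A (Python) =====
-- def tp(trans, ps):
--     """ Translate points ps using trans """
--     r = []
--     i = 0
--     for p in ps:
--         r.append(p + trans[i])
--         i = (i + 1) % len(trans)
--     return tuple(r)
--
-- def relative_boxes(bb):
--
--     t_left = [(-3, i) for i in range(-3, 4)]
--     to_the_left = [tp(t, bb) for t in t_left]
--
--     t_top = [(i, -3) for i in range(-3, 4)]
--     to_the_top = [tp(t, bb) for t in t_top]
--
--     t_right = [(3, i) for i in range(-3, 4)]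
--     to_the_right = [tp(t, bb) for t in t_right]
--
--     t_bottom = [(i, 3) for i in range(-3, 4)]
--     to_the_bottom = [tp(t, bb) for t in t_bottom]
--
--     outside_boxes = to_the_left + to_the_top + to_the_right + to_the_bottom
--
--     # Selection boxes that touch the outside of the bounding box
--     touch_left = [tp((1, 0), b) for b in to_the_left[1:-1]]
--     touch_top = [tp((0, 1), b) for b in to_the_top[1:-1]]
--     touch_right = [tp((-1, 0), b) for b in to_the_right[1:-1]]
--     touch_bottom = [tp((0, -1), b) for b in to_the_bottom[1:-1]]
--
--     touching_boxes = touch_left + touch_top + touch_right + touch_bottom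
--
--     # Partial overlapping boxes
--     overlap_left = [tp((1, 0), b) for b in touch_left[1:-1]]
--     overlap_top = [tp((0, 1), b) for b in touch_top[1:-1]]
--     overlap_right = [tp((-1, 0), b) for b in touch_right[1:-1]]
--     overlap_bottom = [tp((0, -1), b) for b in touch_bottom[1:-1]]
--
--     overlap_boxes = overlap_left + overlap_top + overlap_right + overlap_bottom
--
--     return outside_boxes, touching_boxes, overlap_boxes
-- ===== SOURCE B (Python) =====
-- def relative_boxes(bb):
--     def shift(dx, dy):
--         return tuple(p + (dx if i % 2 == 0 else dy) for i, p in enumerate(bb))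
--
--     outside_boxes = ([shift(-3, j) for j in range(-3, 4)] +
--                      [shift(j, -3) for j in range(-3, 4)] +
--                      [shift(3, j) for j in range(-3, 4)] +
--                      [shift(j, 3) for j in range(-3, 4)])
--
--     touching_boxes = ([shift(-2, j) for j in range(-2, 3)] +
--                       [shift(j, -2) for j in range(-2, 3)] +
--                       [shift(2, j) for j in range(-2, 3)] +
--                       [shift(j, 2) for j in range(-2, 3)])
--
--     overlap_boxes = ([shift(-1, j) for j in range(-1, 2)] +
--                      [shift(j, -1) for j in range(-1, 2)] +
--                      [shift(1, j) for j in range(-1, 2)] +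
--                      [shift(j, 1) for j in range(-1, 2)])
--
--     return outside_boxes, touching_boxes, overlap_boxes
-- ===== Notes on version B (the rewrite author's own statement) =====
-- stated objective: simpler
-- what changed: B computes each of the three groups directly from bb with precomputed net offsets (a single shift per box), instead of A's chained construction where touching boxes are re-translations of slices of the outside boxes and overlap boxes of slices of the touching ones.
import Mathlib
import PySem

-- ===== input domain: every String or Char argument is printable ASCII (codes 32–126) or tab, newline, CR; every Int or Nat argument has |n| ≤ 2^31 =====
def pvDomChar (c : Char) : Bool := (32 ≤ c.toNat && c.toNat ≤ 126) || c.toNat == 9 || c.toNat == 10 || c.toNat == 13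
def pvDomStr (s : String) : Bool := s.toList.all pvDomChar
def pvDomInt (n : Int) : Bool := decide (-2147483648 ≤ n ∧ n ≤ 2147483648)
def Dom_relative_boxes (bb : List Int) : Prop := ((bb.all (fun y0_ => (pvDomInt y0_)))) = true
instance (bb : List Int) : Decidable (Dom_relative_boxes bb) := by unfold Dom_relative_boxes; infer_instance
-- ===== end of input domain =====

-- B computes each of the three groups directly from bb with precomputed net offsets,
-- instead of A's chained re-translation of slices of the previous group (objective: simpler).

-- ===== PORT A =====
-- tp(trans, ps): translate points cyclically; here trans is always a 2-tuple, so trans[i] with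
-- i ∈ {0,1} is ported as fst/snd and i = (i + 1) % len(trans) as PySem.Int.mod (i + 1) 2.
def tp (trans : Int × Int) (ps : List Int) : List Int :=
  (ps.foldl (fun (acc : List Int × Int) p =>
      (acc.1 ++ [p + (if acc.2 = 0 then trans.1 else trans.2)],
       PySem.Int.mod (acc.2 + 1) 2)) (([] : List Int), (0 : Int))).1

def relative_boxes (bb : List Int) : List (List Int) × List (List Int) × List (List Int) :=
  let t_left := (PySem.List.pyRange (-3) 4 1).map (fun i => ((-3 : Int), i))
  let to_the_left := t_left.map (fun t => tp t bb)
  let t_top := (PySem.List.pyRange (-3) 4 1).map (fun i => (i, (-3 : Int)))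
  let to_the_top := t_top.map (fun t => tp t bb)
  let t_right := (PySem.List.pyRange (-3) 4 1).map (fun i => ((3 : Int), i))
  let to_the_right := t_right.map (fun t => tp t bb)
  let t_bottom := (PySem.List.pyRange (-3) 4 1).map (fun i => (i, (3 : Int)))
  let to_the_bottom := t_bottom.map (fun t => tp t bb)
  let outside_boxes := to_the_left ++ to_the_top ++ to_the_right ++ to_the_bottom
  let touch_left := (PySem.List.slice to_the_left (some 1) (some (-1))).map (fun b => tp (1, 0) b)
  let touch_top := (PySem.List.slice to_the_top (some 1) (some (-1))).map (fun b => tp (0, 1) b)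
  let touch_right := (PySem.List.slice to_the_right (some 1) (some (-1))).map (fun b => tp (-1, 0) b)
  let touch_bottom := (PySem.List.slice to_the_bottom (some 1) (some (-1))).map (fun b => tp (0, -1) b)
  let touching_boxes := touch_left ++ touch_top ++ touch_right ++ touch_bottom
  let overlap_left := (PySem.List.slice touch_left (some 1) (some (-1))).map (fun b => tp (1, 0) b)
  let overlap_top := (PySem.List.slice touch_top (some 1) (some (-1))).map (fun b => tp (0, 1) b)
  let overlap_right := (PySem.List.slice touch_right (some 1) (some (-1))).map (fun b => tp (-1, 0) b)
  let overlap_bottom := (PySem.List.slice touch_bottom (some 1) (some (-1))).map (fun b => tp (0, -1) b)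
  let overlap_boxes := overlap_left ++ overlap_top ++ overlap_right ++ overlap_bottom
  (outside_boxes, touching_boxes, overlap_boxes)

-- ===== PORT B =====
-- shift(dx, dy): add dx to even-indexed and dy to odd-indexed coordinates of bb.
def shiftB (bb : List Int) (dx dy : Int) : List Int :=
  (PySem.List.enumerate bb).map (fun ip => ip.2 + (if PySem.Int.mod ip.1 2 = 0 then dx else dy))

def relative_boxes_alt (bb : List Int) : List (List Int) × List (List Int) × List (List Int) :=
  let outside_boxes :=
    (PySem.List.pyRange (-3) 4 1).map (fun j => shiftB bb (-3) j) ++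
    (PySem.List.pyRange (-3) 4 1).map (fun j => shiftB bb j (-3)) ++
    (PySem.List.pyRange (-3) 4 1).map (fun j => shiftB bb 3 j) ++
    (PySem.List.pyRange (-3) 4 1).map (fun j => shiftB bb j 3)
  let touching_boxes :=
    (PySem.List.pyRange (-2) 3 1).map (fun j => shiftB bb (-2) j) ++
    (PySem.List.pyRange (-2) 3 1).map (fun j => shiftB bb j (-2)) ++
    (PySem.List.pyRange (-2) 3 1).map (fun j => shiftB bb 2 j) ++
    (PySem.List.pyRange (-2) 3 1).map (fun j => shiftB bb j 2)
  let overlap_boxes :=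
    (PySem.List.pyRange (-1) 2 1).map (fun j => shiftB bb (-1) j) ++
    (PySem.List.pyRange (-1) 2 1).map (fun j => shiftB bb j (-1)) ++
    (PySem.List.pyRange (-1) 2 1).map (fun j => shiftB bb 1 j) ++
    (PySem.List.pyRange (-1) 2 1).map (fun j => shiftB bb j 1)
  (outside_boxes, touching_boxes, overlap_boxes)

-- ===== PRECONDITION & SPEC =====
def Spec_relative_boxes (bb : List Int) (out : List (List Int) × List (List Int) × List (List Int)) : Prop := out = relative_boxes_alt bb
instance (bb : List Int) (out : List (List Int) × List (List Int) × List (List Int)) : Decidable (Spec_relative_boxes bb out) := by unfold Spec_relative_boxes; infer_instance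

-- ===== CLAIM (what is proved, stated in full; the proofs are below) =====
def Claim_equal_relative_boxes : Prop := ∀ (bb : List Int), Dom_relative_boxes bb → Spec_relative_boxes bb (relative_boxes bb)

-- ===== LEMMAS AND PROOFS =====

-- canonical alternating translation, the common ground of both ports
def tr (x y : Int) : List Int → List Int
  | [] => []
  | p :: ps => (p + x) :: tr y x ps

theorem tp_go (x y : Int) : ∀ (ps : List Int) (r : List Int) (i : Int), i = 0 ∨ i = 1 →
    (ps.foldl (fun (acc : List Int × Int) p =>
      (acc.1 ++ [p + (if acc.2 = 0 then x else y)],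
       PySem.Int.mod (acc.2 + 1) 2)) (r, i)).1
    = r ++ (if i = 0 then tr x y ps else tr y x ps) := by
  intro ps
  induction ps with
  | nil => intro r i _; simp [tr]
  | cons p ps ih =>
    intro r i hi
    rcases hi with h | h <;> subst h <;> simp only [List.foldl_cons]
    · have h1 : PySem.Int.mod (0 + 1 : Int) 2 = 1 := by decide
      rw [h1, ih _ 1 (Or.inr rfl)]
      simp [tr]
    · have h1 : PySem.Int.mod (1 + 1 : Int) 2 = 0 := by decide
      rw [h1, ih _ 0 (Or.inl rfl)]
      simp [tr]

theorem tp_eq_tr (x y : Int) (ps : List Int) : tp (x, y) ps = tr x y ps := by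
  unfold tp
  rw [tp_go x y ps [] 0 (Or.inl rfl)]
  simp

theorem shiftB_go (x y : Int) : ∀ (ps : List Int) (n : Int),
    (PySem.List.enumerate ps n).map (fun ip => ip.2 + (if PySem.Int.mod ip.1 2 = 0 then x else y))
    = if PySem.Int.mod n 2 = 0 then tr x y ps else tr y x ps := by
  intro ps
  induction ps with
  | nil => intro n; simp [PySem.List.enumerate, tr]
  | cons p ps ih =>
    intro n
    simp only [PySem.List.enumerate, List.map_cons, ih (n + 1)]
    by_cases h : (2 : Int) ∣ n
    · have h1 : ¬ (2 : Int) ∣ (n + 1) := by omega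
      simp [h, h1, tr]
    · have h1 : (2 : Int) ∣ (n + 1) := by omega
      simp [h, h1, tr]

theorem shiftB_eq_tr (ps : List Int) (x y : Int) : shiftB ps x y = tr x y ps := by
  unfold shiftB
  rw [shiftB_go x y ps 0]
  norm_num

theorem tr_tr : ∀ (ps : List Int) (x y a b : Int), tr x y (tr a b ps) = tr (a + x) (b + y) ps := by
  intro ps
  induction ps with
  | nil => intros; simp [tr]
  | cons p ps ih => intro x y a b; simp [tr, ih]; ring

-- ===== VERDICT (by name: the statement is the Claim_ definition above) =====
theorem relative_boxes_spec : Claim_equal_relative_boxes := by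
  intro bb _
  unfold Spec_relative_boxes relative_boxes relative_boxes_alt
  have hr3 : PySem.List.pyRange (-3) 4 1 = [-3, -2, -1, 0, 1, 2, 3] := by decide
  have hr2 : PySem.List.pyRange (-2) 3 1 = [-2, -1, 0, 1, 2] := by decide
  have hr1 : PySem.List.pyRange (-1) 2 1 = [-1, 0, 1] := by decide
  simp only [hr3, hr2, hr1, List.map_cons, List.map_nil]
  simp only [PySem.List.slice, PySem.List.clampIdx]
  norm_num [tp_eq_tr, shiftB_eq_tr, tr_tr]
  simp only [show ((6 : Int).toNat) = 6 from rfl, show ((4 : Int).toNat) = 4 from rfl]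
  norm_num [List.take_succ_cons, List.drop_succ_cons]
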